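-- pv_equiv track=rewrite | github.com/mahanshi/BP-Project | Code/Final version/txt_to_json.py | split_out
-- ===== SOURCE A (Python) =====
-- def split_out(s, x):
--     res = []
--     cur = ''
--     k = 0
--     s += x
--     for i in s:
--         if i == x and k == 0:
--             res.append(cur)
--             cur = ''
--         else:
--             cur += i
--         k += (i == '(')
--         k -= (i == ')')
--     return res
-- ===== SOURCE B (Python) =====
-- def split_out(s, x):
--     t = s + x
--     k = 0
--     cuts = []
--     for p, c in enumerate(t):
--         if c == x and k == 0:
--             cuts.append(p)
--         k += (c == '(')
--         k -= (c == ')')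
--     res = []
--     start = 0
--     for p in cuts:
--         res.append(t[start:p])
--         start = p + 1
--     return res
-- ===== Notes on version B (the rewrite author's own statement) =====
-- stated objective: alternative
-- what changed: A builds segments in one scan with a running current-segment accumulator; B first records the indices of top-level delimiter occurrences in one depth-tracking pass and then produces the result by slicing s+x between consecutive cut indices in a second pass.
import Mathlib
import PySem

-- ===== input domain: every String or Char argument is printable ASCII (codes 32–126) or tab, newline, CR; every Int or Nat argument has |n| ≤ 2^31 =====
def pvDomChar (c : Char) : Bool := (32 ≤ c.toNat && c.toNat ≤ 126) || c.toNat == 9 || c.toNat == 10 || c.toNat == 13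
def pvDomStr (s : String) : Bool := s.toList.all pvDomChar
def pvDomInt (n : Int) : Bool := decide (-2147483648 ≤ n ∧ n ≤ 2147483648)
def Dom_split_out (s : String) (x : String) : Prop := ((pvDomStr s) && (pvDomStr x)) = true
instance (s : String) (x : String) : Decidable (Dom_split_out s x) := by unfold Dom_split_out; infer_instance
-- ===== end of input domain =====

-- B re-decomposes A's one accumulating scan into two passes (collect top-level cut positions, then slice);
-- same return value, objective: alternative decomposition.

-- ===== PORT A =====
-- A iterates over the characters of s + x, accumulating cur and emitting it on a
-- top-level delimiter; 'i == x' (1-char string vs x) is compared via toList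
-- (Python string equality = equality of the character lists).
def split_out (s : String) (x : String) : List String :=
  let s2 : List Char := s.toList ++ x.toList                     -- s += x
  let st := s2.foldl
    (fun (acc : List String × List Char × Int) i =>
      let res := acc.1
      let cur := acc.2.1
      let k := acc.2.2
      let rc : List String × List Char :=
        if x.toList = [i] ∧ k = 0 then (res ++ [String.ofList cur], []) else (res, cur ++ [i])
      (rc.1, rc.2,
        k + (if i = '(' then 1 else 0) - (if i = ')' then 1 else 0)))
    ([], [], 0)
  st.1

-- ===== PORT B =====
-- pass 1: record the indices of top-level delimiter characters; pass 2: slice t between cuts.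
def split_out_alt (s : String) (x : String) : List String :=
  let t : List Char := s.toList ++ x.toList                      -- t = s + x
  let r1 := (PySem.List.enumerate t).foldl
    (fun (acc : Int × List Int) pc =>
      let cuts := if x.toList = [pc.2] ∧ acc.1 = 0 then acc.2 ++ [pc.1] else acc.2
      (acc.1 + (if pc.2 = '(' then 1 else 0) - (if pc.2 = ')' then 1 else 0), cuts))
    (0, [])
  let r2 := r1.2.foldl
    (fun (acc : List String × Int) p =>
      (acc.1 ++ [String.ofList (PySem.List.slice t (some acc.2) (some p))], p + 1))
    ([], 0)
  r2.1

-- ===== PRECONDITION & SPEC =====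
def Spec_split_out (s : String) (x : String) (out : List String) : Prop := out = split_out_alt s x
instance (s : String) (x : String) (out : List String) : Decidable (Spec_split_out s x out) := by unfold Spec_split_out; infer_instance

-- ===== CLAIM (what is proved, stated in full; the proofs are below) =====
def Claim_equal_split_out : Prop := ∀ (s : String) (x : String), Dom_split_out s x → Spec_split_out s x (split_out s x)

-- ===== LEMMAS AND PROOFS =====

-- depth update shared by both scans
def pvD (c : Char) (k : Int) : Int :=
  k + (if c = '(' then 1 else 0) - (if c = ')' then 1 else 0)

-- named forms of the three fold steps (proved equal to the ports' lambdas pointwise)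
def pvStepA (xl : List Char) (acc : List String × List Char × Int) (i : Char) :
    List String × List Char × Int :=
  if xl = [i] ∧ acc.2.2 = 0 then (acc.1 ++ [String.ofList acc.2.1], [], pvD i acc.2.2)
  else (acc.1, acc.2.1 ++ [i], pvD i acc.2.2)

def pvStepB1 (xl : List Char) (acc : Int × List Int) (pc : Int × Char) : Int × List Int :=
  (pvD pc.2 acc.1, if xl = [pc.2] ∧ acc.1 = 0 then acc.2 ++ [pc.1] else acc.2)

def pvStepB2 (t : List Char) (acc : List String × Int) (p : Int) : List String × Int :=
  (acc.1 ++ [String.ofList (PySem.List.slice t (some acc.2) (some p))], p + 1)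

-- recursive characterisation of A's scan
def pvSegs (x : List Char) : List Char → List Char → Int → List String
  | [], _, _ => []
  | c :: cs, cur, k =>
    if x = [c] ∧ k = 0 then String.ofList cur :: pvSegs x cs [] (pvD c k)
    else pvSegs x cs (cur ++ [c]) (pvD c k)

-- recursive characterisation of B's first pass (cut positions, as naturals)
def pvCuts (x : List Char) : List Char → Nat → Int → List Nat
  | [], _, _ => []
  | c :: cs, p, k =>
    (if x = [c] ∧ k = 0 then [p] else []) ++ pvCuts x cs (p + 1) (pvD c k)

-- recursive characterisation of B's second pass
def pvSlices (t : List Char) : List Nat → Nat → List String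
  | [], _ => []
  | p :: ps, start => String.ofList ((t.drop start).take (p - start)) :: pvSlices t ps (p + 1)

theorem pvStepA_eq (x : String) :
    (fun (acc : List String × List Char × Int) i =>
      let res := acc.1
      let cur := acc.2.1
      let k := acc.2.2
      let rc : List String × List Char :=
        if x.toList = [i] ∧ k = 0 then (res ++ [String.ofList cur], []) else (res, cur ++ [i])
      (rc.1, rc.2,
        k + (if i = '(' then 1 else 0) - (if i = ')' then 1 else 0)))
    = pvStepA x.toList := by
  funext acc i
  by_cases h : x.toList = [i] ∧ acc.2.2 = 0 <;> simp [pvStepA, pvD, h]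

theorem pvStepB1_eq (x : String) :
    (fun (acc : Int × List Int) (pc : Int × Char) =>
      let cuts := if x.toList = [pc.2] ∧ acc.1 = 0 then acc.2 ++ [pc.1] else acc.2
      (acc.1 + (if pc.2 = '(' then 1 else 0) - (if pc.2 = ')' then 1 else 0), cuts))
    = pvStepB1 x.toList := by
  funext acc pc
  by_cases h : x.toList = [pc.2] ∧ acc.1 = 0 <;> simp [pvStepB1, pvD, h]

theorem pvStepB2_eq (t : List Char) :
    (fun (acc : List String × Int) p =>
      (acc.1 ++ [String.ofList (PySem.List.slice t (some acc.2) (some p))], p + 1))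
    = pvStepB2 t := rfl

theorem pvA_fold (xl : List Char) (l : List Char) (res : List String) (cur : List Char) (k : Int) :
    (l.foldl (pvStepA xl) (res, cur, k)).1 = res ++ pvSegs xl l cur k := by
  induction l generalizing res cur k with
  | nil => simp [pvSegs]
  | cons c cs ih =>
    rw [List.foldl_cons]
    by_cases h : xl = [c] ∧ k = 0
    · rw [show pvStepA xl (res, cur, k) c = (res ++ [String.ofList cur], [], pvD c k) from by
        simp [pvStepA, h.1, h.2]]
      rw [ih]
      simp only [pvSegs]
      rw [if_pos h]
      simp
    · rw [show pvStepA xl (res, cur, k) c = (res, cur ++ [c], pvD c k) from by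
        simp [pvStepA, h]]
      rw [ih]
      simp only [pvSegs]
      rw [if_neg h]

theorem pvB_fold1 (xl : List Char) (l : List Char) (p : Nat) (k : Int) (cs0 : List Int) :
    ((PySem.List.enumerate l (p : Int)).foldl (pvStepB1 xl) (k, cs0)).2
      = cs0 ++ (pvCuts xl l p k).map (fun n : Nat => (n : Int)) := by
  induction l generalizing p k cs0 with
  | nil => simp [PySem.List.enumerate_nil, pvCuts]
  | cons c cs ih =>
    rw [PySem.List.enumerate_cons, List.foldl_cons]
    have hc : ((p : Int) + 1) = ((p + 1 : Nat) : Int) := by push_cast; ring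
    by_cases h : xl = [c] ∧ k = 0
    · rw [show pvStepB1 xl (k, cs0) ((p : Int), c) = (pvD c k, cs0 ++ [(p : Int)]) from by
        simp [pvStepB1, h.1, h.2]]
      rw [hc, ih]
      simp only [pvCuts]
      rw [if_pos h]
      simp
    · rw [show pvStepB1 xl (k, cs0) ((p : Int), c) = (pvD c k, cs0) from by
        simp [pvStepB1, h]]
      rw [hc, ih]
      simp only [pvCuts]
      rw [if_neg h]
      simp

theorem pvB_fold2 (t : List Char) (cuts : List Nat) (res : List String) (start : Nat) :
    ((cuts.map (fun n : Nat => (n : Int))).foldl (pvStepB2 t) (res, (start : Int))).1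
      = res ++ pvSlices t cuts start := by
  induction cuts generalizing res start with
  | nil => simp [pvSlices]
  | cons p ps ih =>
    rw [List.map_cons, List.foldl_cons]
    have hc : ((p : Int) + 1) = ((p + 1 : Nat) : Int) := by push_cast; ring
    rw [show pvStepB2 t (res, (start : Int)) (p : Int)
        = (res ++ [String.ofList ((t.drop start).take (p - start))], (p : Int) + 1) from by
      simp [pvStepB2, PySem.List.slice_natCast]]
    rw [hc, ih]
    simp [pvSlices]

theorem pvMain (x : List Char) (l : List Char) (k : Int) (start pos : Nat) (t : List Char)
    (hsp : start ≤ pos) (hdrop : t.drop pos = l) :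
    pvSlices t (pvCuts x l pos k) start = pvSegs x l ((t.drop start).take (pos - start)) k := by
  induction l generalizing k start pos with
  | nil => simp [pvCuts, pvSegs, pvSlices]
  | cons c cs ih =>
    have hget? : t[pos]? = some c := by
      have h0 : (t.drop pos)[0]? = some c := by rw [hdrop]; rfl
      rw [List.getElem?_drop] at h0
      simpa using h0
    have hdrop' : t.drop (pos + 1) = cs := by
      have h1 : (t.drop pos).tail = cs := by rw [hdrop]; rfl
      rw [List.tail_drop] at h1
      simpa [Nat.add_comm] using h1
    by_cases h : x = [c] ∧ k = 0
    · have ih' := ih (pvD c k) (pos + 1) (pos + 1) (le_refl _) hdrop'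
      simp only [Nat.sub_self, List.take_zero] at ih'
      simp only [pvCuts, pvSegs]
      rw [if_pos h, if_pos h, List.cons_append, List.nil_append]
      simp only [pvSlices]
      rw [ih', h.2]
    · have ih' := ih (pvD c k) start (pos + 1) (by omega) hdrop'
      have htake : (t.drop start).take (pos + 1 - start)
          = (t.drop start).take (pos - start) ++ [c] := by
        have h1 : pos + 1 - start = (pos - start) + 1 := by omega
        have h2 : (t.drop start)[pos - start]? = some c := by
          rw [List.getElem?_drop]
          rwa [show start + (pos - start) = pos from by omega]
        rw [h1, List.take_add_one, h2]
        rfl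
      simp only [pvCuts, pvSegs]
      rw [if_neg h, if_neg h, List.nil_append, ih', htake]

-- ===== VERDICT (by name: the statement is the Claim_ definition above) =====
theorem split_out_spec : Claim_equal_split_out := by
  intro s x _
  unfold Spec_split_out split_out split_out_alt
  dsimp only
  rw [pvStepA_eq x, pvStepB1_eq x, pvStepB2_eq]
  have h1 := pvB_fold1 x.toList (s.toList ++ x.toList) 0 0 []
  simp only [Nat.cast_zero, List.nil_append] at h1
  rw [pvA_fold, h1]
  have h2 := pvB_fold2 (s.toList ++ x.toList) (pvCuts x.toList (s.toList ++ x.toList) 0 0) [] 0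
  simp only [Nat.cast_zero, List.nil_append] at h2
  rw [h2, List.nil_append]
  exact (pvMain x.toList (s.toList ++ x.toList) 0 0 0 (s.toList ++ x.toList) (le_refl _) rfl).symm
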